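-- pv_equiv track=rewrite | github.com/YargleWithWings/AdventOfCode2023 | day1.py | findLineTotal
-- ===== SOURCE A (Python) =====
-- def findLineTotal(line):
--    #find the first integer
--    lowestIndex = len(line)
--    highestIndex = -1
--    firstInt = ""
--    lastInt = ""
--    for num in spelled_out_numbers:
--       firstIndex = line.find(num)
--       lastIndex = line.rfind(num)
--       if(firstIndex != -1):
--          if(firstIndex < lowestIndex):
--             lowestIndex = firstIndex
--             firstInt = str(spelled_out_numbers.index(num) + 1)
--          if(lastIndex > highestIndex):
--             highestIndex = lastIndex
--             lastInt = str(spelled_out_numbers.index(num) + 1)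
--    for index2 in range(len(line)):
--       char = line[index2]
--       if(char.isdigit()):
--          if(index2 < lowestIndex):
--             lowestIndex = index2
--             firstInt = char
--          if(index2 > highestIndex):
--             highestIndex = index2
--             lastInt = char
--    return int(firstInt + lastInt)
--
-- spelled_out_numbers = ["one", "two", "three", "four", "five", "six", "seven", "eight", "nine"]
-- ===== SOURCE B (Python) =====
-- spelled_out_numbers = ["one", "two", "three", "four", "five", "six", "seven", "eight", "nine"]
--
-- def findLineTotal(line):
--    firstInt = ""
--    lastInt = ""
--    for i in range(len(line)):
--       ch = line[i]
--       if ch.isdigit():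
--          v = ch
--       else:
--          v = ""
--          for idx, num in enumerate(spelled_out_numbers):
--             if line.startswith(num, i):
--                v = str(idx + 1)
--                break
--       if v:
--          if not firstInt:
--             firstInt = v
--          lastInt = v
--    return int(firstInt + lastInt)
-- ===== Notes on version B (the rewrite author's own statement) =====
-- stated objective: alternative
-- what changed: Replaces A's nine find/rfind passes with min/max index bookkeeping by a single forward scan that records the first-seen and last-seen token (digit or spelled word tested at each position).
-- outside the precondition, e.g. on findLineTotal(''): A raises ValueError, B raises ValueError
import Mathlib
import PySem

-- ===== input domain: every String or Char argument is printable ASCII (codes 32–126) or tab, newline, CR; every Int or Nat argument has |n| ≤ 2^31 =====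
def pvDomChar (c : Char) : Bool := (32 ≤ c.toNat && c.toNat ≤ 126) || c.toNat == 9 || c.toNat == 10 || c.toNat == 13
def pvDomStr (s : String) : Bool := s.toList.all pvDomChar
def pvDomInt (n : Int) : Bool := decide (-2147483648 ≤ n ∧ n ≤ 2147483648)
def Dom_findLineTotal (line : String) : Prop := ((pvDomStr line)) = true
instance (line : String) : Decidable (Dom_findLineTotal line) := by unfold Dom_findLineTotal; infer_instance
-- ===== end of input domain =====

-- B replaces A's nine find/rfind passes with one forward scan recording the first- and last-seen
-- token (digit or spelled word tested at each position); same result, a different algorithm.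

-- ===== PORT A =====
def spelledOutNumbers : List String :=
  ["one", "two", "three", "four", "five", "six", "seven", "eight", "nine"]

def aWordStep (line : String) (st : Int × Int × List Char × List Char) (num : String) :
    Int × Int × List Char × List Char :=
  let firstIndex := PySem.Str.find line num
  let lastIndex := PySem.Str.rfind line num
  if firstIndex ≠ -1 then
    let lof := if firstIndex < st.1 then
        (firstIndex, PySem.Int.toChars ((((PySem.List.index? spelledOutNumbers num).getD 0) + 1 : ℕ) : ℤ))
      else (st.1, st.2.2.1)
    let hil := if lastIndex > st.2.1 then
        (lastIndex, PySem.Int.toChars ((((PySem.List.index? spelledOutNumbers num).getD 0) + 1 : ℕ) : ℤ))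
      else (st.2.1, st.2.2.2)
    (lof.1, hil.1, lof.2, hil.2)
  else st

def aDigitStep (line : String) (st : Int × Int × List Char × List Char) (index2 : Int) :
    Int × Int × List Char × List Char :=
  -- index2 comes from range(len(line)), so line[index2] never raises; getD is exact here
  let char := (PySem.List.pyGet? line.toList index2).getD ' '
  if PySem.Chars.isdigit char then
    let lof := if index2 < st.1 then (index2, [char]) else (st.1, st.2.2.1)
    let hil := if index2 > st.2.1 then (index2, [char]) else (st.2.1, st.2.2.2)
    (lof.1, hil.1, lof.2, hil.2)
  else st

def findLineTotal (line : String) : Int :=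
  let st1 := spelledOutNumbers.foldl (aWordStep line) (PySem.Str.len line, -1, [], [])
  let st2 := (PySem.List.pyRange 0 (PySem.Str.len line) 1).foldl (aDigitStep line) st1
  -- int(firstInt + lastInt); int('') raises ValueError in Python: those inputs are outside Pre_
  (PySem.Int.ofChars? (st2.2.2.1 ++ st2.2.2.2)).getD 0

-- ===== PORT B =====
-- line.startswith(num, i) with 0 ≤ i is exactly: num is a prefix of line[i:] (ported via drop)
def bTokenAt (line : String) (i : Int) : List Char :=
  let ch := (PySem.List.pyGet? line.toList i).getD ' '   -- i from range(len(line)): in range, exact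
  if PySem.Chars.isdigit ch then [ch]
  else
    match (PySem.List.enumerate spelledOutNumbers).find?
        (fun p => PySem.Chars.startswith (line.toList.drop i.toNat) p.2.toList) with
    | some p => PySem.Int.toChars (p.1 + 1)
    | none => []

def bStep (line : String) (st : List Char × List Char) (i : Int) : List Char × List Char :=
  let v := bTokenAt line i
  if v ≠ [] then (if st.1 = [] then v else st.1, v) else st

def findLineTotal_alt (line : String) : Int :=
  let st := (PySem.List.pyRange 0 (PySem.Str.len line) 1).foldl (bStep line) ([], [])
  (PySem.Int.ofChars? (st.1 ++ st.2)).getD 0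

-- ===== PRECONDITION & SPEC =====
-- Pre_ excludes exactly the lines with no digit and no spelled number, on which A's int('') raises ValueError
def Pre_findLineTotal (line : String) : Prop :=
  (line.toList.any PySem.Chars.isdigit) = true ∨
  (spelledOutNumbers.any (fun num => PySem.Str.isIn num line)) = true
instance (line : String) : Decidable (Pre_findLineTotal line) := by
  unfold Pre_findLineTotal; infer_instance
def pvWitness_findLineTotal : String := "a1b"

def Spec_findLineTotal (line : String) (out : Int) : Prop := out = findLineTotal_alt line
instance (line : String) (out : Int) : Decidable (Spec_findLineTotal line out) := by
  unfold Spec_findLineTotal; infer_instance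

-- ===== CLAIM (what is proved, stated in full; the proofs are below) =====
def Claim_equal_findLineTotal : Prop :=
  ∀ (line : String), Dom_findLineTotal line → Pre_findLineTotal line →
    Spec_findLineTotal line (findLineTotal line)

-- ===== LEMMAS AND PROOFS =====

-- spec-level vocabulary: the nine words with their digit values, and the token at a position
def words9 : List (List Char × Char) :=
  [(['o','n','e'],'1'), (['t','w','o'],'2'), (['t','h','r','e','e'],'3'),
   (['f','o','u','r'],'4'), (['f','i','v','e'],'5'), (['s','i','x'],'6'),
   (['s','e','v','e','n'],'7'), (['e','i','g','h','t'],'8'), (['n','i','n','e'],'9')]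

def tokval (cs : List Char) (k : Nat) : Option Char :=
  match cs[k]? with
  | none => none
  | some ch =>
    if PySem.Chars.isdigit ch then some ch
    else (words9.find? (fun p => p.1.isPrefixOf (cs.drop k))).map Prod.snd

def vals (cs : List Char) (k : Nat) : List Char :=
  (List.range k).filterMap (tokval cs)

-- state predicates for A's 4-tuple (lowestIndex, highestIndex, firstInt, lastInt)
def LoOK (cs : List Char) (st : Int × Int × List Char × List Char) : Prop :=
  (st.1 = (cs.length : Int) ∧ st.2.2.1 = []) ∨
  (∃ p ∈ words9, PySem.Chars.find cs p.1 = st.1 ∧ 0 ≤ st.1 ∧ st.2.2.1 = [p.2]) ∨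
  (∃ k : Nat, k < cs.length ∧ (cs[k]?.any PySem.Chars.isdigit) = true ∧ st.1 = (k : Int) ∧
    st.2.2.1 = cs[k]?.toList)

def HiOK (cs : List Char) (st : Int × Int × List Char × List Char) : Prop :=
  (st.2.1 = -1 ∧ st.2.2.2 = []) ∨
  (∃ p ∈ words9, PySem.Chars.rfind cs p.1 = st.2.1 ∧ 0 ≤ st.2.1 ∧ st.2.2.2 = [p.2]) ∨
  (∃ k : Nat, k < cs.length ∧ (cs[k]?.any PySem.Chars.isdigit) = true ∧ st.2.1 = (k : Int) ∧
    st.2.2.2 = cs[k]?.toList)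

-- facts about the literal word list (all decidable)
theorem w9_nonempty : ∀ p ∈ words9, p.1 ≠ [] := by decide

theorem w9_nonprefix : ∀ p ∈ words9, ∀ q ∈ words9, p.1.isPrefixOf q.1 = true → p = q := by decide

theorem mem_spelled_pair : ∀ num ∈ spelledOutNumbers, ∃ p ∈ words9, num.toList = p.1 ∧
    PySem.Int.toChars ((((PySem.List.index? spelledOutNumbers num).getD 0) + 1 : ℕ) : ℤ) = [p.2] := by
  decide

theorem w9_spelled : ∀ p ∈ words9, ∃ num ∈ spelledOutNumbers, num.toList = p.1 := by decide

theorem w9_spelled_rev : ∀ num ∈ spelledOutNumbers, ∃ p ∈ words9, num.toList = p.1 := by decide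

theorem w9_head_not_digit : ∀ p ∈ words9, ∀ c ∈ p.1, PySem.Chars.isdigit c = false := by
  intro p hp c hc
  fin_cases hp <;> fin_cases hc <;> decide

-- rfind characterization (induction over rfind.go)
theorem rfind_go_cases (s sub : List Char) (j : Nat) :
    (PySem.Chars.rfind.go s sub j = -1 ∧ ∀ i ≤ j, ¬ sub <+: s.drop i) ∨
    (∃ k : Nat, PySem.Chars.rfind.go s sub j = (k : Int) ∧ k ≤ j ∧ sub <+: s.drop k ∧
      ∀ i, k < i → i ≤ j → ¬ sub <+: s.drop i) := by
  induction j with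
  | zero =>
    by_cases h : sub.isPrefixOf s = true
    · right
      exact ⟨0, by simp [PySem.Chars.rfind.go, h], le_refl _,
        by simpa using (List.isPrefixOf_iff_prefix.mp h), by omega⟩
    · left
      constructor
      · simp [PySem.Chars.rfind.go, h]
      · intro i hi
        interval_cases i
        simpa [List.isPrefixOf_iff_prefix] using h
  | succ j ih =>
    by_cases h : sub.isPrefixOf (s.drop (j+1)) = true
    · right
      exact ⟨j+1, by simp [PySem.Chars.rfind.go, h], le_refl _,
        List.isPrefixOf_iff_prefix.mp h, by omega⟩
    · have hnp : ¬ sub <+: s.drop (j+1) := by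
        simpa [List.isPrefixOf_iff_prefix] using h
      have hgo : PySem.Chars.rfind.go s sub (j+1) = PySem.Chars.rfind.go s sub j := by
        simp [PySem.Chars.rfind.go, h]
      rcases ih with ⟨h1, h2⟩ | ⟨k, hk1, hk2, hk3, hk4⟩
      · left
        refine ⟨by rw [hgo]; exact h1, ?_⟩
        intro i hi
        rcases Nat.lt_or_ge i (j+1) with hlt | hge
        · exact h2 i (by omega)
        · have : i = j + 1 := by omega
          subst this; exact hnp
      · right
        refine ⟨k, by rw [hgo]; exact hk1, by omega, hk3, ?_⟩
        intro i hi1 hi2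
        rcases Nat.lt_or_ge i (j+1) with hlt | hge
        · exact hk4 i hi1 (by omega)
        · have : i = j + 1 := by omega
          subst this; exact hnp

theorem infix_of_prefix_drop {s sub : List Char} {k : Nat} (h : sub <+: s.drop k) :
    sub <:+: s := by
  obtain ⟨r, hr⟩ := h
  obtain ⟨u, hu⟩ := List.drop_suffix k s
  exact ⟨u, r, by rw [List.append_assoc, hr, hu]⟩

theorem rfind_cases (s sub : List Char) :
    (PySem.Chars.rfind s sub = -1 ∧ ∀ i ≤ s.length, ¬ sub <+: s.drop i) ∨
    (∃ k : Nat, PySem.Chars.rfind s sub = (k : Int) ∧ k ≤ s.length ∧ sub <+: s.drop k ∧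
      ∀ i, k < i → i ≤ s.length → ¬ sub <+: s.drop i) := by
  have := rfind_go_cases s sub s.length
  simpa [PySem.Chars.rfind] using this

theorem occ_le_rfind (s sub : List Char) (k : Nat) (hk : k ≤ s.length)
    (h : sub <+: s.drop k) : (k : Int) ≤ PySem.Chars.rfind s sub := by
  rcases rfind_cases s sub with ⟨h1, h2⟩ | ⟨k0, hk1, hk2, hk3, hk4⟩
  · exact absurd h (h2 k hk)
  · rw [hk1]
    by_contra hc
    push_neg at hc
    have : k0 < k := by exact_mod_cast hc
    exact hk4 k this hk h

theorem find_neg_rfind_neg (s sub : List Char) (h : PySem.Chars.find s sub = -1) :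
    PySem.Chars.rfind s sub = -1 := by
  rcases rfind_cases s sub with ⟨h1, _⟩ | ⟨k0, hk1, hk2, hk3, _⟩
  · exact h1
  · exact absurd (infix_of_prefix_drop hk3) ((PySem.Chars.find_eq_neg_one_iff s sub).mp h)

-- occurrence facts for find
theorem occ_facts (cs w : List Char) (k : Nat) (hw : w ≠ []) (h : w <+: cs.drop k) :
    k < cs.length ∧ 0 ≤ PySem.Chars.find cs w ∧ PySem.Chars.find cs w ≤ (k : Int) := by
  have hlt : k < cs.length := by
    by_contra hc
    push_neg at hc
    rw [List.drop_eq_nil_of_le hc] at h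
    exact hw (List.prefix_nil.mp h)
  have hnn : 0 ≤ PySem.Chars.find cs w :=
    (PySem.Chars.find_nonneg_iff cs w).mpr (infix_of_prefix_drop h)
  refine ⟨hlt, hnn, ?_⟩
  by_contra hc
  push_neg at hc
  have hk : k < (PySem.Chars.find cs w).toNat := by omega
  exact (PySem.Chars.find_spec hnn).2 k hk h

-- token facts
theorem tok_lt (cs : List Char) (k : Nat) (c : Char) (h : tokval cs k = some c) :
    k < cs.length := by
  unfold tokval at h
  cases hk : cs[k]? with
  | none => rw [hk] at h; simp at h
  | some ch => exact (List.getElem?_eq_some_iff.mp hk).1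

theorem word_at_head (cs : List Char) (p : List Char × Char) (hp : p ∈ words9) (k : Nat)
    (h : p.1 <+: cs.drop k) : ∃ ch, cs[k]? = some ch ∧ PySem.Chars.isdigit ch = false := by
  obtain ⟨c, rest, hcr⟩ : ∃ c rest, p.1 = c :: rest := by
    cases hp1 : p.1 with
    | nil => exact absurd hp1 (w9_nonempty p hp)
    | cons a t => exact ⟨a, t, rfl⟩
  obtain ⟨t, ht⟩ := h
  have hdrop : cs.drop k = c :: (rest ++ t) := by rw [← ht, hcr]; simp
  have hget : cs[k]? = some c := by
    have h0 : (cs.drop k)[0]? = some c := by rw [hdrop]; rfl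
    rw [List.getElem?_drop] at h0
    simpa using h0
  exact ⟨c, hget, w9_head_not_digit p hp c (by rw [hcr]; exact List.mem_cons_self)⟩

theorem tok_word_val (cs : List Char) (p : List Char × Char) (hp : p ∈ words9) (k : Nat)
    (h : p.1 <+: cs.drop k) : tokval cs k = some p.2 := by
  obtain ⟨ch, hget, hnd⟩ := word_at_head cs p hp k h
  unfold tokval
  rw [hget]
  simp only [hnd, Bool.false_eq_true, if_false]
  cases hf : words9.find? (fun q => q.1.isPrefixOf (cs.drop k)) with
  | none =>
    have := List.find?_eq_none.mp hf p hp
    rw [List.isPrefixOf_iff_prefix] at this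
    exact absurd h (by simpa using this)
  | some q =>
    have hqmem := List.mem_of_find?_eq_some hf
    have hqpre : q.1 <+: cs.drop k := by
      have := List.find?_some hf
      simpa [List.isPrefixOf_iff_prefix] using this
    have hpq : p = q := by
      rcases List.prefix_or_prefix_of_prefix h hqpre with hc | hc
      · exact w9_nonprefix p hp q hqmem (List.isPrefixOf_iff_prefix.mpr hc)
      · exact (w9_nonprefix q hqmem p hp (List.isPrefixOf_iff_prefix.mpr hc)).symm
    simp [hpq]

theorem tok_digit (cs : List Char) (k : Nat) (ch : Char) (h : cs[k]? = some ch)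
    (hd : PySem.Chars.isdigit ch = true) : tokval cs k = some ch := by
  simp [tokval, h, hd]

theorem tok_some_cases (cs : List Char) (k : Nat) (c : Char) (h : tokval cs k = some c) :
    (cs[k]? = some c ∧ (cs[k]?.any PySem.Chars.isdigit) = true) ∨
    (∃ p ∈ words9, p.1 <+: cs.drop k ∧ c = p.2 ∧ (cs[k]?.any PySem.Chars.isdigit) = false) := by
  unfold tokval at h
  cases hk : cs[k]? with
  | none => rw [hk] at h; simp at h
  | some ch =>
    rw [hk] at h
    by_cases hd : PySem.Chars.isdigit ch = true
    · simp only [hd, if_true] at h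
      left
      exact ⟨h, by simp [hd]⟩
    · simp only [hd] at h
      simp only [Bool.false_eq_true, if_false] at h
      cases hf : words9.find? (fun q => q.1.isPrefixOf (cs.drop k)) with
      | none => rw [hf] at h; simp at h
      | some q =>
        rw [hf] at h
        simp only [Option.map_some, Option.some_inj] at h
        right
        refine ⟨q, List.mem_of_find?_eq_some hf, ?_, h.symm, ?_⟩
        · have := List.find?_some hf
          simpa [List.isPrefixOf_iff_prefix] using this
        · simp only [Option.any_some]
          simp at hd
          exact hd

theorem pre_token (line : String) (h : Pre_findLineTotal line) :
    ∃ k c, tokval line.toList k = some c := by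
  rcases h with hany | hany
  · obtain ⟨c, hc, hd⟩ := List.any_eq_true.mp hany
    obtain ⟨k, hk, hget⟩ := List.getElem_of_mem hc
    exact ⟨k, c, tok_digit _ _ _ (List.getElem?_eq_some_iff.mpr ⟨hk, hget⟩) hd⟩
  · obtain ⟨num, hnum, hin⟩ := List.any_eq_true.mp hany
    have hinf : num.toList <:+: line.toList := by
      have := PySem.Str.isIn_iff_infix num line
      exact this.mp hin
    obtain ⟨u, v, huv⟩ := hinf
    have hpre : num.toList <+: line.toList.drop u.length := by
      rw [← huv]
      simp
    obtain ⟨p, hp, hnp⟩ := w9_spelled_rev num hnum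
    exact ⟨u.length, p.2, tok_word_val _ p hp _ (hnp ▸ hpre)⟩

theorem rfind_occ (s sub : List Char) (h : PySem.Chars.find s sub ≠ -1) :
    ∃ k : Nat, PySem.Chars.rfind s sub = (k : Int) ∧ sub <+: s.drop k ∧ k ≤ s.length := by
  rcases rfind_cases s sub with ⟨h1, h2⟩ | ⟨k, hk1, hk2, hk3, _⟩
  · exfalso
    obtain ⟨u, v, huv⟩ := (PySem.Chars.find_ne_neg_one_iff s sub).mp h
    have hpre : sub <+: s.drop u.length := by
      rw [← huv]; simp
    have hle : u.length ≤ s.length := by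
      rw [← huv]; simp
    exact h2 u.length hle hpre
  · exact ⟨k, hk1, hk3, hk2⟩

theorem aWordStep_ok (line : String) (num : String) (hnum : num ∈ spelledOutNumbers)
    (st : Int × Int × List Char × List Char)
    (hLo : LoOK line.toList st) (hHi : HiOK line.toList st) :
    LoOK line.toList (aWordStep line st num) ∧ HiOK line.toList (aWordStep line st num) ∧
    (aWordStep line st num).1 ≤ st.1 ∧ st.2.1 ≤ (aWordStep line st num).2.1 ∧
    (PySem.Chars.find line.toList num.toList = -1 ∨
      (aWordStep line st num).1 ≤ PySem.Chars.find line.toList num.toList) ∧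
    (PySem.Chars.rfind line.toList num.toList = -1 ∨
      PySem.Chars.rfind line.toList num.toList ≤ (aWordStep line st num).2.1) := by
  obtain ⟨p, hp, hnl, hval⟩ := mem_spelled_pair num hnum
  unfold aWordStep
  simp only [PySem.Str.find_eq, PySem.Str.rfind_eq]
  by_cases hfi : PySem.Chars.find line.toList num.toList = -1
  · rw [if_neg (by simpa using hfi)]
    exact ⟨hLo, hHi, le_refl _, le_refl _, Or.inl hfi, Or.inl (find_neg_rfind_neg _ _ hfi)⟩
  · rw [if_pos hfi]
    have h0fi : 0 ≤ PySem.Chars.find line.toList num.toList := by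
      have := PySem.Chars.neg_one_le_find line.toList num.toList
      omega
    obtain ⟨kr, hkr, hkrpre, hkrle⟩ := rfind_occ line.toList num.toList hfi
    have h0li : 0 ≤ PySem.Chars.rfind line.toList num.toList := by
      rw [hkr]; exact Int.natCast_nonneg kr
    have hLoNew : LoOK line.toList
        (PySem.Chars.find line.toList num.toList, st.2.1,
          PySem.Int.toChars ((((PySem.List.index? spelledOutNumbers num).getD 0) + 1 : ℕ) : ℤ),
          st.2.2.2) := by
      refine Or.inr (Or.inl ⟨p, hp, ?_, h0fi, ?_⟩)
      · rw [← hnl]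
      · exact hval
    have hHiNew : ∀ lo f, HiOK line.toList
        (lo, PySem.Chars.rfind line.toList num.toList, f,
          PySem.Int.toChars ((((PySem.List.index? spelledOutNumbers num).getD 0) + 1 : ℕ) : ℤ)) := by
      intro lo f
      refine Or.inr (Or.inl ⟨p, hp, ?_, h0li, ?_⟩)
      · rw [← hnl]
      · exact hval
    by_cases hlt : PySem.Chars.find line.toList num.toList < st.1 <;>
      by_cases hgt : PySem.Chars.rfind line.toList num.toList > st.2.1
    · simp only [if_pos hlt, if_pos hgt]
      exact ⟨hLoNew, hHiNew _ _, by omega, by omega, Or.inr (le_refl _), Or.inr (le_refl _)⟩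
    · simp only [if_pos hlt, if_neg hgt]
      refine ⟨hLoNew, ?_, by omega, by omega, Or.inr (le_refl _), Or.inr (by omega)⟩
      rcases hHi with h | h | h
      · exact Or.inl ⟨h.1, h.2⟩
      · exact Or.inr (Or.inl h)
      · exact Or.inr (Or.inr h)
    · simp only [if_neg hlt, if_pos hgt]
      refine ⟨?_, hHiNew _ _, by omega, by omega, Or.inr (by omega), Or.inr (le_refl _)⟩
      rcases hLo with h | h | h
      · exact Or.inl ⟨h.1, h.2⟩
      · exact Or.inr (Or.inl h)
      · exact Or.inr (Or.inr h)
    · simp only [if_neg hlt, if_neg hgt]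
      refine ⟨?_, ?_, by omega, by omega, Or.inr (by omega), Or.inr (by omega)⟩
      · rcases hLo with h | h | h
        · exact Or.inl ⟨h.1, h.2⟩
        · exact Or.inr (Or.inl h)
        · exact Or.inr (Or.inr h)
      · rcases hHi with h | h | h
        · exact Or.inl ⟨h.1, h.2⟩
        · exact Or.inr (Or.inl h)
        · exact Or.inr (Or.inr h)

-- A: the word loop
theorem wordloop_ok (line : String) (nums : List String)
    (hsub : ∀ num ∈ nums, num ∈ spelledOutNumbers) (st : Int × Int × List Char × List Char)
    (hLo : LoOK line.toList st) (hHi : HiOK line.toList st) :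
    LoOK line.toList (nums.foldl (aWordStep line) st) ∧
    HiOK line.toList (nums.foldl (aWordStep line) st) ∧
    (nums.foldl (aWordStep line) st).1 ≤ st.1 ∧
    st.2.1 ≤ (nums.foldl (aWordStep line) st).2.1 ∧
    (∀ num ∈ nums,
      (PySem.Chars.find line.toList num.toList = -1 ∨
        (nums.foldl (aWordStep line) st).1 ≤ PySem.Chars.find line.toList num.toList) ∧
      (PySem.Chars.rfind line.toList num.toList = -1 ∨
        PySem.Chars.rfind line.toList num.toList ≤ (nums.foldl (aWordStep line) st).2.1)) := by
  induction nums generalizing st with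
  | nil =>
    simp only [List.foldl_nil]
    exact ⟨hLo, hHi, le_refl _, le_refl _, by simp⟩
  | cons num rest ih =>
    simp only [List.foldl_cons]
    obtain ⟨hLo1, hHi1, hm1, hm2, hcov1, hcov2⟩ :=
      aWordStep_ok line num (hsub num (by simp)) st hLo hHi
    obtain ⟨hLo2, hHi2, hm3, hm4, hcov⟩ :=
      ih (fun m hm => hsub m (by simp [hm])) (aWordStep line st num) hLo1 hHi1
    refine ⟨hLo2, hHi2, le_trans hm3 hm1, le_trans hm2 hm4, ?_⟩
    intro m hm
    rcases List.mem_cons.mp hm with rfl | hm'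
    · constructor
      · rcases hcov1 with h | h
        · exact Or.inl h
        · exact Or.inr (le_trans hm3 h)
      · rcases hcov2 with h | h
        · exact Or.inl h
        · exact Or.inr (le_trans h hm4)
    · exact hcov m hm'

theorem aDigitStep_ok (line : String) (i : Int) (h0 : 0 ≤ i)
    (hn : i < (line.toList.length : Int)) (st : Int × Int × List Char × List Char)
    (hLo : LoOK line.toList st) (hHi : HiOK line.toList st) :
    LoOK line.toList (aDigitStep line st i) ∧ HiOK line.toList (aDigitStep line st i) ∧
    (aDigitStep line st i).1 ≤ st.1 ∧ st.2.1 ≤ (aDigitStep line st i).2.1 ∧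
    ((line.toList[i.toNat]?).any PySem.Chars.isdigit = true →
      (aDigitStep line st i).1 ≤ i ∧ i ≤ (aDigitStep line st i).2.1) := by
  have hkn : i.toNat < line.toList.length := by omega
  obtain ⟨c, hc⟩ : ∃ c, line.toList[i.toNat]? = some c :=
    ⟨_, List.getElem?_eq_some_iff.mpr ⟨hkn, rfl⟩⟩
  have hcast : ((i.toNat : ℕ) : ℤ) = i := Int.toNat_of_nonneg h0
  unfold aDigitStep
  simp only [PySem.List.pyGet?_of_nonneg line.toList h0, hc, Option.getD_some]
  by_cases hd : PySem.Chars.isdigit c = true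
  · rw [if_pos hd]
    have hLoNew : LoOK line.toList (i, st.2.1, [c], st.2.2.2) := by
      refine Or.inr (Or.inr ⟨i.toNat, hkn, by simp [hc, hd], hcast.symm, by simp [hc]⟩)
    have hHiNew : ∀ lo f, HiOK line.toList (lo, i, f, [c]) := by
      intro lo f
      refine Or.inr (Or.inr ⟨i.toNat, hkn, by simp [hc, hd], hcast.symm, by simp [hc]⟩)
    by_cases hlt : i < st.1 <;> by_cases hgt : i > st.2.1
    · simp only [if_pos hlt, if_pos hgt]
      exact ⟨hLoNew, hHiNew _ _, by omega, by omega, fun _ => ⟨le_refl _, le_refl _⟩⟩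
    · simp only [if_pos hlt, if_neg hgt]
      refine ⟨hLoNew, ?_, by omega, by omega, fun _ => ⟨le_refl _, by omega⟩⟩
      rcases hHi with h | h | h
      · exact Or.inl ⟨h.1, h.2⟩
      · exact Or.inr (Or.inl h)
      · exact Or.inr (Or.inr h)
    · simp only [if_neg hlt, if_pos hgt]
      refine ⟨?_, hHiNew _ _, by omega, by omega, fun _ => ⟨by omega, le_refl _⟩⟩
      rcases hLo with h | h | h
      · exact Or.inl ⟨h.1, h.2⟩
      · exact Or.inr (Or.inl h)
      · exact Or.inr (Or.inr h)
    · simp only [if_neg hlt, if_neg hgt]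
      refine ⟨?_, ?_, by omega, by omega, fun _ => ⟨by omega, by omega⟩⟩
      · rcases hLo with h | h | h
        · exact Or.inl ⟨h.1, h.2⟩
        · exact Or.inr (Or.inl h)
        · exact Or.inr (Or.inr h)
      · rcases hHi with h | h | h
        · exact Or.inl ⟨h.1, h.2⟩
        · exact Or.inr (Or.inl h)
        · exact Or.inr (Or.inr h)
  · rw [if_neg hd]
    refine ⟨hLo, hHi, le_refl _, le_refl _, fun hdig => ?_⟩
    simp only [Option.any_some] at hdig
    exact absurd hdig hd

-- A: the digit loop
theorem digitloop_ok (line : String) (is : List Int)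
    (his : ∀ i ∈ is, 0 ≤ i ∧ i < (line.toList.length : Int))
    (st : Int × Int × List Char × List Char)
    (hLo : LoOK line.toList st) (hHi : HiOK line.toList st) :
    LoOK line.toList (is.foldl (aDigitStep line) st) ∧
    HiOK line.toList (is.foldl (aDigitStep line) st) ∧
    (is.foldl (aDigitStep line) st).1 ≤ st.1 ∧
    st.2.1 ≤ (is.foldl (aDigitStep line) st).2.1 ∧
    (∀ i ∈ is, ((line.toList[i.toNat]?).any PySem.Chars.isdigit) = true →
      (is.foldl (aDigitStep line) st).1 ≤ i ∧ i ≤ (is.foldl (aDigitStep line) st).2.1) := by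
  induction is generalizing st with
  | nil =>
    simp only [List.foldl_nil]
    exact ⟨hLo, hHi, le_refl _, le_refl _, by simp⟩
  | cons i rest ih =>
    simp only [List.foldl_cons]
    obtain ⟨hi0, hin⟩ := his i (by simp)
    obtain ⟨hLo1, hHi1, hm1, hm2, hcov1⟩ := aDigitStep_ok line i hi0 hin st hLo hHi
    obtain ⟨hLo2, hHi2, hm3, hm4, hcov⟩ :=
      ih (fun j hj => his j (by simp [hj])) (aDigitStep line st i) hLo1 hHi1
    refine ⟨hLo2, hHi2, le_trans hm3 hm1, le_trans hm2 hm4, ?_⟩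
    intro j hj hdig
    rcases List.mem_cons.mp hj with rfl | hj'
    · obtain ⟨ha, hb⟩ := hcov1 hdig
      exact ⟨le_trans hm3 ha, le_trans hb hm4⟩
    · exact hcov j hj' hdig

-- B: the scan computes tokval, and the fold keeps (head, last) of the token list
theorem enum_find_gen (ds : List Char) (l : List (Int × String)) :
    ∀ (w : List (List Char × Char)),
      l.map (fun q => q.2.toList) = w.map Prod.fst →
      (∀ a ∈ l.zip w, PySem.Int.toChars (a.1.1 + 1) = [a.2.2]) →
      (match l.find? (fun q => PySem.Chars.startswith ds q.2.toList) with
       | some q => PySem.Int.toChars (q.1 + 1)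
       | none => ([] : List Char))
      = ((w.find? (fun p => p.1.isPrefixOf ds)).map Prod.snd).toList := by
  induction l with
  | nil =>
    intro w hmap _
    have hw : w = [] := by
      cases w with
      | nil => rfl
      | cons b w' => simp at hmap
    subst hw
    simp
  | cons a l' ih =>
    intro w hmap hzip
    cases w with
    | nil => simp at hmap
    | cons b w' =>
      simp only [List.map_cons, List.cons.injEq] at hmap
      obtain ⟨hhd, htl⟩ := hmap
      have hcond : PySem.Chars.startswith ds a.2.toList = b.1.isPrefixOf ds := by
        show a.2.toList.isPrefixOf ds = b.1.isPrefixOf ds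
        rw [hhd]
      rw [List.find?_cons, List.find?_cons, hcond]
      cases hb : b.1.isPrefixOf ds with
      | true =>
        simp only []
        have := hzip (a, b) (by simp)
        simp only [Option.map_some]
        rw [this]
        rfl
      | false =>
        simp only []
        exact ih w' htl (fun q hq => hzip q (by simp [hq]))

theorem enum_find_spelled (ds : List Char) :
    (match (PySem.List.enumerate spelledOutNumbers).find?
        (fun q => PySem.Chars.startswith ds q.2.toList) with
     | some q => PySem.Int.toChars (q.1 + 1)
     | none => ([] : List Char))
    = ((words9.find? (fun p => p.1.isPrefixOf ds)).map Prod.snd).toList := by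
  refine enum_find_gen ds (PySem.List.enumerate spelledOutNumbers) words9 (by decide) (by decide)

theorem bTokenAt_eq (line : String) (k : Nat) (hk : k < line.toList.length) :
    bTokenAt line (k : Int) = (tokval line.toList k).toList := by
  obtain ⟨c, hc⟩ : ∃ c, line.toList[k]? = some c :=
    ⟨_, List.getElem?_eq_some_iff.mpr ⟨hk, rfl⟩⟩
  unfold bTokenAt tokval
  simp only [PySem.List.pyGet?_natCast, hc, Option.getD_some, Int.toNat_natCast]
  by_cases hd : PySem.Chars.isdigit c = true
  · simp only [hd, if_true]
    rfl
  · simp only [hd, Bool.false_eq_true, if_false]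
    exact enum_find_spelled (line.toList.drop k)

theorem bloop (line : String) (k : Nat) (hk : k ≤ line.toList.length) :
    List.foldl (bStep line) ([], []) (List.map (fun (j : Nat) => (j : Int)) (List.range k)) =
      ((vals line.toList k).head?.toList, (vals line.toList k).getLast?.toList) := by
  induction k with
  | zero => simp [vals]
  | succ k ih =>
    have hk' : k ≤ line.toList.length := by omega
    have hkn : k < line.toList.length := by omega
    rw [List.range_succ, List.map_append, List.foldl_append, ih hk']
    have hv : vals line.toList (k+1) = vals line.toList k ++ (tokval line.toList k).toList := by
      cases h : tokval line.toList k <;>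
        simp [vals, List.range_succ, List.filterMap_append, h]
    rw [hv]
    simp only [List.map_cons, List.map_nil, List.foldl_cons, List.foldl_nil]
    unfold bStep
    rw [bTokenAt_eq line k hkn]
    cases htk : tokval line.toList k with
    | none => simp
    | some c =>
      simp only [Option.toList_some]
      rw [if_pos (by simp)]
      cases hvk : vals line.toList k with
      | nil => simp
      | cons a t =>
        simp only [List.head?_cons, Option.toList_some]
        rw [if_neg (by simp)]
        rw [List.getLast?_concat]
        simp

-- head/last of the token-value list at the extremal token indices
theorem vals_head (cs : List Char) (i0 : Nat) (c0 : Char) (h : tokval cs i0 = some c0)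
    (hmin : ∀ j < i0, tokval cs j = none) :
    (vals cs cs.length).head? = some c0 := by
  have hi0n : i0 < cs.length := tok_lt _ _ _ h
  have hsplit : List.range cs.length =
      List.range i0 ++ (List.range (cs.length - i0)).map (fun x => i0 + x) := by
    conv_lhs => rw [show cs.length = i0 + (cs.length - i0) by omega]
    exact List.range_add
  unfold vals
  rw [hsplit, List.filterMap_append]
  have h1 : (List.range i0).filterMap (tokval cs) = [] :=
    List.filterMap_eq_nil_iff.mpr (fun j hj => hmin j (List.mem_range.mp hj))
  rw [h1, List.nil_append]
  rw [show cs.length - i0 = (cs.length - i0 - 1) + 1 by omega, List.range_succ_eq_map]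
  simp only [List.map_cons, Nat.add_zero, List.filterMap_cons, h]
  rfl

theorem vals_last (cs : List Char) (iN : Nat) (cN : Char) (h : tokval cs iN = some cN)
    (hmax : ∀ j, iN < j → tokval cs j = none) :
    (vals cs cs.length).getLast? = some cN := by
  have hiNn : iN < cs.length := tok_lt _ _ _ h
  have hsplit : List.range cs.length =
      List.range (iN + 1) ++ (List.range (cs.length - (iN + 1))).map (fun x => (iN + 1) + x) := by
    conv_lhs => rw [show cs.length = (iN + 1) + (cs.length - (iN + 1)) by omega]
    exact List.range_add
  unfold vals
  rw [hsplit, List.filterMap_append]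
  have h2 : ((List.range (cs.length - (iN + 1))).map (fun x => (iN + 1) + x)).filterMap
      (tokval cs) = [] := by
    refine List.filterMap_eq_nil_iff.mpr ?_
    intro j hj
    obtain ⟨x, _, rfl⟩ := List.mem_map.mp hj
    exact hmax _ (by omega)
  rw [h2, List.append_nil]
  rw [List.range_succ, List.filterMap_append]
  simp only [List.filterMap_cons, h, List.filterMap_nil]
  exact List.getLast?_concat

-- ===== VERDICT (by name: the statement is the Claim_ definition above) =====
theorem tok_none_of_ge (cs : List Char) (j : Nat) (hj : cs.length ≤ j) :
    tokval cs j = none := by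
  unfold tokval
  rw [List.getElem?_eq_none hj]

theorem findLineTotal_spec : Claim_equal_findLineTotal := by
  unfold Claim_equal_findLineTotal
  intro line _hdom hpre
  unfold Spec_findLineTotal findLineTotal findLineTotal_alt
  have hlen : PySem.Str.len line = (line.toList.length : Int) := PySem.Str.len_eq line
  have hrange : PySem.List.pyRange 0 (PySem.Str.len line) 1 =
      List.map (fun (k : Nat) => (k : Int)) (List.range line.toList.length) := by
    rw [hlen]; exact PySem.List.pyRange_zero_natCast _
  -- extremal token indices
  obtain ⟨k0, c0', htok0⟩ := pre_token line hpre
  have hex : ∃ j, (tokval line.toList j).isSome = true := ⟨k0, by simp [htok0]⟩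
  obtain ⟨c0, hc0⟩ : ∃ c, tokval line.toList (Nat.find hex) = some c :=
    Option.isSome_iff_exists.mp (Nat.find_spec hex)
  have hmin : ∀ j < Nat.find hex, tokval line.toList j = none := by
    intro j hj
    have hnm := Nat.find_min hex hj
    cases h : tokval line.toList j with
    | none => rfl
    | some c => exact absurd (by simp [h]) hnm
  have hk0n : k0 < line.toList.length := tok_lt _ _ _ htok0
  set nGr := Nat.findGreatest (fun j => (tokval line.toList j).isSome = true)
    line.toList.length with hnGrdef
  have hPk0 : (tokval line.toList k0).isSome = true := by simp [htok0]
  have hPN : (tokval line.toList nGr).isSome = true := by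
    rw [hnGrdef]
    exact Nat.findGreatest_spec (P := fun j => (tokval line.toList j).isSome = true) (le_of_lt hk0n) hPk0
  obtain ⟨cN, hcN⟩ : ∃ c, tokval line.toList nGr = some c :=
    Option.isSome_iff_exists.mp hPN
  have hmax : ∀ j, nGr < j → tokval line.toList j = none := by
    intro j hj
    by_cases hjn : j ≤ line.toList.length
    · rw [hnGrdef] at hj
      have hng := Nat.findGreatest_is_greatest (P := fun j => (tokval line.toList j).isSome = true) hj hjn
      cases h : tokval line.toList j with
      | none => rfl
      | some c => exact absurd (by simp [h]) hng
    · exact tok_none_of_ge _ _ (by omega)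
  -- A's word loop
  have hLo0 : LoOK line.toList (PySem.Str.len line, -1, [], []) := Or.inl ⟨hlen, rfl⟩
  have hHi0 : HiOK line.toList (PySem.Str.len line, -1, [], []) := Or.inl ⟨rfl, rfl⟩
  obtain ⟨hLo1, hHi1, _, _, hcovW⟩ :=
    wordloop_ok line spelledOutNumbers (fun _ h => h) _ hLo0 hHi0
  -- A's digit loop
  have his : ∀ i ∈ List.map (fun (k : Nat) => (k : Int)) (List.range line.toList.length),
      0 ≤ i ∧ i < (line.toList.length : Int) := by
    intro i hi
    obtain ⟨j, hj, rfl⟩ := List.mem_map.mp hi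
    have := List.mem_range.mp hj
    omega
  obtain ⟨hLo2, hHi2, hm21, hm22, hcovD⟩ := digitloop_ok line _ his _ hLo1 hHi1
  set st2 := (List.map (fun (k : Nat) => (k : Int)) (List.range line.toList.length)).foldl
    (aDigitStep line)
    (spelledOutNumbers.foldl (aWordStep line) (PySem.Str.len line, -1, [], [])) with hst2
  have hcovW2 : ∀ num ∈ spelledOutNumbers,
      (PySem.Chars.find line.toList num.toList = -1 ∨
        st2.1 ≤ PySem.Chars.find line.toList num.toList) ∧
      (PySem.Chars.rfind line.toList num.toList = -1 ∨
        PySem.Chars.rfind line.toList num.toList ≤ st2.2.1) := by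
    intro num hnum
    obtain ⟨hA, hB⟩ := hcovW num hnum
    constructor
    · rcases hA with h | h
      · exact Or.inl h
      · exact Or.inr (le_trans hm21 h)
    · rcases hB with h | h
      · exact Or.inl h
      · exact Or.inr (le_trans h hm22)
  -- every token index bounds A's final state
  have hbound : ∀ (i : Nat) (c : Char), tokval line.toList i = some c →
      st2.1 ≤ (i : Int) ∧ (i : Int) ≤ st2.2.1 := by
    intro i c htok
    have hin : i < line.toList.length := tok_lt _ _ _ htok
    rcases tok_some_cases _ _ _ htok with ⟨hget, hdig⟩ | ⟨p, hp, hpre', hc, hndig⟩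
    · have hmem : ((i : Nat) : Int) ∈
          List.map (fun (k : Nat) => (k : Int)) (List.range line.toList.length) :=
        List.mem_map.mpr ⟨i, List.mem_range.mpr hin, rfl⟩
      have := hcovD _ hmem (by simpa using hdig)
      exact this
    · obtain ⟨num, hnum, hnl⟩ := w9_spelled p hp
      obtain ⟨_, hfnn, hfle⟩ := occ_facts line.toList p.1 i (w9_nonempty p hp) hpre'
      have hrle : (i : Int) ≤ PySem.Chars.rfind line.toList p.1 :=
        occ_le_rfind line.toList p.1 i (le_of_lt hin) hpre'
      obtain ⟨hA, hB⟩ := hcovW2 num hnum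
      rw [hnl] at hA hB
      constructor
      · rcases hA with h | h
        · omega
        · omega
      · rcases hB with h | h
        · omega
        · omega
  obtain ⟨hup0, _⟩ := hbound (Nat.find hex) c0 hc0
  obtain ⟨_, hupN⟩ := hbound nGr cN hcN
  have hi0n : Nat.find hex < line.toList.length := tok_lt _ _ _ hc0
  -- A's firstInt
  have hLoRes : st2.2.2.1 = [c0] := by
    rcases hLo2 with ⟨h1, h2⟩ | ⟨p, hp, hfind, hnn, hf⟩ | ⟨k, hkn, hdig, hkval, hf⟩
    · exfalso; omega
    · have h0f : 0 ≤ PySem.Chars.find line.toList p.1 := by rw [hfind]; exact hnn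
      have hprefix : p.1 <+: line.toList.drop st2.1.toNat := by
        have := (PySem.Chars.find_spec h0f).1
        rwa [hfind] at this
      have htokm : tokval line.toList st2.1.toNat = some p.2 := tok_word_val _ p hp _ hprefix
      have hge : Nat.find hex ≤ st2.1.toNat := Nat.find_min' hex (by simp [htokm])
      have heq : st2.1.toNat = Nat.find hex := by omega
      rw [heq] at htokm
      rw [hf, Option.some_inj.mp (htokm.symm.trans hc0)]
    · obtain ⟨ch, hch⟩ : ∃ ch, line.toList[k]? = some ch := by
        cases hh : line.toList[k]? with
        | none => rw [hh] at hdig; simp at hdig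
        | some ch => exact ⟨ch, rfl⟩
      have hdch : PySem.Chars.isdigit ch = true := by
        rw [hch] at hdig; simpa using hdig
      have htokk : tokval line.toList k = some ch := tok_digit _ _ _ hch hdch
      have hge : Nat.find hex ≤ k := Nat.find_min' hex (by simp [htokk])
      have heq : k = Nat.find hex := by omega
      rw [heq] at htokk
      rw [hf, hch, Option.toList_some, Option.some_inj.mp (htokk.symm.trans hc0)]
  -- A's lastInt
  have hHiRes : st2.2.2.2 = [cN] := by
    rcases hHi2 with ⟨h1, h2⟩ | ⟨p, hp, hrfind, hnn, hf⟩ | ⟨k, hkn, hdig, hkval, hf⟩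
    · exfalso; omega
    · rcases rfind_cases line.toList p.1 with ⟨hr1, _⟩ | ⟨k', hk1, hk2, hk3, _⟩
      · rw [hr1] at hrfind; omega
      · have hkeq : (k' : Int) = st2.2.1 := by rw [← hk1, hrfind]
        have htokm : tokval line.toList k' = some p.2 := tok_word_val _ p hp _ hk3
        have hle : k' ≤ nGr := by
          rw [hnGrdef]
          exact Nat.le_findGreatest (P := fun j => (tokval line.toList j).isSome = true) hk2 (by simp [htokm])
        have heq : k' = nGr := by omega
        rw [heq] at htokm
        rw [hf, Option.some_inj.mp (htokm.symm.trans hcN)]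
    · obtain ⟨ch, hch⟩ : ∃ ch, line.toList[k]? = some ch := by
        cases hh : line.toList[k]? with
        | none => rw [hh] at hdig; simp at hdig
        | some ch => exact ⟨ch, rfl⟩
      have hdch : PySem.Chars.isdigit ch = true := by
        rw [hch] at hdig; simpa using hdig
      have htokk : tokval line.toList k = some ch := tok_digit _ _ _ hch hdch
      have hle : k ≤ nGr := by
        rw [hnGrdef]
        exact Nat.le_findGreatest (P := fun j => (tokval line.toList j).isSome = true) (le_of_lt hkn) (by simp [htokk])
      have heq : k = nGr := by omega
      rw [heq] at htokk
      rw [hf, hch, Option.toList_some, Option.some_inj.mp (htokk.symm.trans hcN)]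
  -- B's scan
  have hB := bloop line line.toList.length (le_refl _)
  have hBhead := vals_head line.toList (Nat.find hex) c0 hc0 hmin
  have hBlast := vals_last line.toList nGr cN hcN hmax
  rw [hrange]
  show (PySem.Int.ofChars? (st2.2.2.1 ++ st2.2.2.2)).getD 0 =
    (PySem.Int.ofChars?
      ((List.foldl (bStep line) ([], [])
          (List.map (fun (k : Nat) => (k : Int)) (List.range line.toList.length))).1 ++
        (List.foldl (bStep line) ([], [])
          (List.map (fun (k : Nat) => (k : Int)) (List.range line.toList.length))).2)).getD 0
  rw [hLoRes, hHiRes, hB]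
  simp only [hBhead, hBlast, Option.toList_some]
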